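-- pv_equiv track=rewrite | github.com/ShuaiWW/CCTC | cctc.1.1.py | wifi
-- ===== SOURCE A (Python) =====
-- def wifi(ZigBee):
-- 	length=len(ZigBee[0])
-- 	Wi=[]
-- 	for time in range(len(ZigBee)):
-- 		temp=[]
-- 		for i in range(length-3):
-- 			temp.append(ZigBee[time][i]+ZigBee[time][i+1]+ZigBee[time][i+2]+ZigBee[time][i+3])
-- 		Wi.append(temp)
-- 	return Wi
-- ===== SOURCE B (Python) =====
-- def wifi(ZigBee):
--     length = len(ZigBee[0])
--     Wi = []
--     for row in ZigBee:
--         P = [0]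
--         for x in row:
--             P.append(P[-1] + x)
--         Wi.append([P[i + 4] - P[i] for i in range(length - 3)])
--     return Wi
-- ===== Notes on version B (the rewrite author's own statement) =====
-- stated objective: alternative
-- what changed: B builds a running prefix-sum list per row and emits each window as a difference of two prefix sums, instead of A's re-adding four neighbouring elements at every position.
import Mathlib
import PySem

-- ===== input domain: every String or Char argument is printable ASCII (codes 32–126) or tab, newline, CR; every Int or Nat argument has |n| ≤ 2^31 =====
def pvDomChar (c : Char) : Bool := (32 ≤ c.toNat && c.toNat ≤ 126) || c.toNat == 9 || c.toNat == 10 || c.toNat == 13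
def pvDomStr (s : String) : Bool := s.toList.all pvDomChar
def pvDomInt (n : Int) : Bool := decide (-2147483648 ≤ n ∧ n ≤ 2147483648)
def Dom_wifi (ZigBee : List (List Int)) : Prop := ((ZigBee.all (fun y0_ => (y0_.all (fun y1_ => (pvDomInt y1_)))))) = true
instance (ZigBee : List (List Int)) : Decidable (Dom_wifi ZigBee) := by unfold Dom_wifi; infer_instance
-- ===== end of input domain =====

-- B replaces A's four-term neighbour sum at every window by a per-row prefix-sum
-- list and a difference of two prefix sums (alternative decomposition, same cost).

-- ===== PORT A =====
-- A: length = len(ZigBee[0]); for each row, append the sum of four consecutive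
-- elements for i in range(length-3).  Out-of-range indexing (which raises in
-- Python and is excluded by Pre_) is ported with pyGetD's default.
def wifi (ZigBee : List (List Int)) : List (List Int) :=
  let length : Int := (ZigBee.headD []).length
  ZigBee.foldl
    (fun Wi row =>
      Wi ++ [(PySem.List.pyRange 0 (length - 3) 1).foldl
        (fun temp i =>
          temp ++ [PySem.List.pyGetD row i 0 + PySem.List.pyGetD row (i + 1) 0 +
                   PySem.List.pyGetD row (i + 2) 0 + PySem.List.pyGetD row (i + 3) 0]) []])
    []

-- ===== PORT B =====
-- B: per row, build prefix sums P (P[-1] is the running total), then each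
-- window sum is P[i+4] - P[i].
def wifi_alt (ZigBee : List (List Int)) : List (List Int) :=
  let length : Int := (ZigBee.headD []).length
  ZigBee.map
    (fun row =>
      let P : List Int := row.foldl (fun P x => P ++ [PySem.List.pyGetD P (-1) 0 + x]) [0]
      (PySem.List.pyRange 0 (length - 3) 1).map
        (fun i => PySem.List.pyGetD P (i + 4) 0 - PySem.List.pyGetD P i 0))

-- ===== PRECONDITION & SPEC =====
-- Pre_ excludes exactly the inputs where both Pythons raise IndexError:
-- empty ZigBee (ZigBee[0]), and, when the window loop actually runs
-- (len(ZigBee[0]) > 3), any row shorter than len(ZigBee[0]).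
def Pre_wifi (ZigBee : List (List Int)) : Prop :=
  ZigBee ≠ [] ∧ (3 < (ZigBee.headD []).length →
    ∀ row ∈ ZigBee, (ZigBee.headD []).length ≤ row.length)
instance (ZigBee : List (List Int)) : Decidable (Pre_wifi ZigBee) := by
  unfold Pre_wifi; infer_instance
def pvWitness_wifi : List (List Int) := [[1, 2, 3, 4, 5], [0, -1, 2, 7, 9]]
def Spec_wifi (ZigBee : List (List Int)) (out : List (List Int)) : Prop := out = wifi_alt ZigBee
instance (ZigBee : List (List Int)) (out : List (List Int)) : Decidable (Spec_wifi ZigBee out) := by unfold Spec_wifi; infer_instance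

-- ===== CLAIM (what is proved, stated in full; the proofs are below) =====
def Claim_equal_wifi : Prop := ∀ (ZigBee : List (List Int)), Dom_wifi ZigBee → Pre_wifi ZigBee → Spec_wifi ZigBee (wifi ZigBee)

-- ===== LEMMAS AND PROOFS =====

-- B's prefix loop computes the list of partial sums shifted by s.
theorem prefix_foldl_shift (row : List Int) (acc : List Int) (t : Int) :
    row.foldl (fun P x => P ++ [PySem.List.pyGetD P (-1) 0 + x]) (acc ++ [t]) =
      acc ++ row.foldl (fun P x => P ++ [PySem.List.pyGetD P (-1) 0 + x]) [t] := by
  induction row generalizing acc t with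
  | nil => simp
  | cons x xs ih =>
    have ht : PySem.List.pyGetD [t] (-1) 0 = t := by
      simp [PySem.List.pyGetD_neg_one (xs := [t]) (h := by simp)]
    simp only [List.foldl_cons, ht, PySem.List.pyGetD_neg_one_append_singleton]
    rw [ih (acc ++ [t]) (t + x), ih [t] (t + x), List.append_assoc]

theorem prefix_foldl_eq (row : List Int) (s : Int) :
    row.foldl (fun P x => P ++ [PySem.List.pyGetD P (-1) 0 + x]) [s] =
      (List.range (row.length + 1)).map (fun k => s + (row.take k).sum) := by
  induction row generalizing s with
  | nil => simp
  | cons x xs ih =>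
    have ht : PySem.List.pyGetD [s] (-1) 0 = s := by
      simp [PySem.List.pyGetD_neg_one (xs := [s]) (h := by simp)]
    simp only [List.foldl_cons, ht]
    rw [prefix_foldl_shift xs [s] (s + x), ih (s + x),
        show (x :: xs).length + 1 = (xs.length + 1) + 1 from by simp]
    conv_rhs => rw [List.range_succ_eq_map, List.map_cons, List.map_map]
    simp only [List.take_zero, List.sum_nil, add_zero, List.singleton_append]
    congr 1
    apply List.map_congr_left
    intro k _
    simp [Function.comp, List.take_succ_cons]
    ring

-- indexing into the prefix-sum list
theorem getD_prefix (row : List Int) (k : Nat) (hk : k ≤ row.length) :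
    ((List.range (row.length + 1)).map (fun k => (0 : Int) + (row.take k).sum)).getD k 0 =
      (row.take k).sum := by
  rw [List.getD_eq_getElem?_getD, List.getElem?_map, List.getElem?_range (by omega)]
  simp

theorem sum_take_succ_int (row : List Int) (k : Nat) (hk : k < row.length) :
    (row.take (k + 1)).sum = (row.take k).sum + row.getD k 0 := by
  rw [List.sum_take_succ row k hk, List.getD_eq_getElem?_getD, List.getElem?_eq_getElem hk]
  simp

-- four-step expansion of a window as a prefix difference
theorem window_eq (row : List Int) (k : Nat) (hk : k + 3 < row.length) :
    (row.take (k + 4)).sum - (row.take k).sum =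
      row.getD k 0 + row.getD (k + 1) 0 + row.getD (k + 2) 0 + row.getD (k + 3) 0 := by
  have h0 := sum_take_succ_int row k (by omega)
  have h1 := sum_take_succ_int row (k + 1) (by omega)
  have h2 := sum_take_succ_int row (k + 2) (by omega)
  have h3 := sum_take_succ_int row (k + 3) (by omega)
  have : k + 4 = (k + 3) + 1 := by omega
  rw [this, h3, h2, h1, h0]
  ring

-- per-row equality of the two inner computations
theorem row_eq (length : Int) (row : List Int)
    (hrow : 3 < length → length ≤ (row.length : Int)) :
    (PySem.List.pyRange 0 (length - 3) 1).foldl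
        (fun temp i =>
          temp ++ [PySem.List.pyGetD row i 0 + PySem.List.pyGetD row (i + 1) 0 +
                   PySem.List.pyGetD row (i + 2) 0 + PySem.List.pyGetD row (i + 3) 0]) [] =
      (PySem.List.pyRange 0 (length - 3) 1).map
        (fun i => PySem.List.pyGetD
            (row.foldl (fun P x => P ++ [PySem.List.pyGetD P (-1) 0 + x]) [0]) (i + 4) 0 -
          PySem.List.pyGetD
            (row.foldl (fun P x => P ++ [PySem.List.pyGetD P (-1) 0 + x]) [0]) i 0) := by
  rw [PySem.List.foldl_append_singleton_eq_map, List.nil_append, prefix_foldl_eq row 0]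
  apply List.map_congr_left
  intro i hi
  rw [PySem.List.mem_pyRange_one] at hi
  obtain ⟨hi0, hi1⟩ := hi
  have h3 : 3 < length := by omega
  have hlen := hrow h3
  obtain ⟨k, rfl⟩ := Int.eq_ofNat_of_zero_le hi0
  have hk3 : k + 3 < row.length := by omega
  have e4 : ((k : Int) + 4) = ((k + 4 : Nat) : Int) := by push_cast; ring
  have e1 : ((k : Int) + 1) = ((k + 1 : Nat) : Int) := by push_cast; ring
  have e2 : ((k : Int) + 2) = ((k + 2 : Nat) : Int) := by push_cast; ring
  have e3 : ((k : Int) + 3) = ((k + 3 : Nat) : Int) := by push_cast; ring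
  rw [e4, e1, e2, e3]
  simp only [PySem.List.pyGetD_natCast]
  rw [getD_prefix row (k + 4) (by omega), getD_prefix row k (by omega)]
  exact (window_eq row k hk3).symm

-- ===== VERDICT (by name: the statement is the Claim_ definition above) =====
theorem wifi_spec : Claim_equal_wifi := by
  intro ZigBee _ hpre
  obtain ⟨hne, hrows⟩ := hpre
  unfold Spec_wifi wifi wifi_alt
  simp only []
  rw [PySem.List.foldl_append_singleton_eq_map, List.nil_append]
  apply List.map_congr_left
  intro row hrow
  exact row_eq _ row (fun h3 => by
    have := hrows (by exact_mod_cast h3) row hrow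
    exact_mod_cast this)
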